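-- pv_equiv track=rewrite | github.com/Alexarcelo/Pagamentos_Guias_Geral | Pagamentos_Guias.py | filtro_tipo_servico
-- ===== SOURCE A (Python) =====
-- def filtro_tipo_servico(lista):
--     encontrou_out = False
--     for item in lista:
--         if item == 'OUT':
--             encontrou_out = True
--         if item == 'IN' and encontrou_out:
--             return True
--     return False
-- ===== SOURCE B (Python) =====
-- def filtro_tipo_servico(lista):
--     if 'OUT' not in lista:
--         return False
--     i = lista.index('OUT')
--     return 'IN' in lista[i+1:]
-- ===== Notes on version B (the rewrite author's own statement) =====
-- stated objective: idiomatic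
-- what changed: Replaces the flag-carrying single pass with a find-first-'OUT' step (index) followed by a membership test on the tail slice.
import Mathlib
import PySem

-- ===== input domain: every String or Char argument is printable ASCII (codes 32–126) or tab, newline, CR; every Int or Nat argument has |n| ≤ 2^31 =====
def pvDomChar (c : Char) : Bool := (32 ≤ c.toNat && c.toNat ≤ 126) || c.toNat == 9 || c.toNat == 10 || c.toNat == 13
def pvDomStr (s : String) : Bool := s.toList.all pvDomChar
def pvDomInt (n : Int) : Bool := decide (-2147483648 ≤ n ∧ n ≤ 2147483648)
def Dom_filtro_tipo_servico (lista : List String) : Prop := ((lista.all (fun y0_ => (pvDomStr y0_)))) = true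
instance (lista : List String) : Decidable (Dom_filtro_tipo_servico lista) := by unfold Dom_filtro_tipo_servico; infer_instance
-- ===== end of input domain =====

-- B replaces A's flag-carrying scan by index-of-first-'OUT' plus a membership test on the tail slice (idiomatic decomposition, same cost).

-- ===== PORT A =====
-- the for-loop of A, carrying the encontrou_out flag
def filtroLoopA : List String → Bool → Bool
  | [], _ => false
  | item :: rest, encontrou_out =>
    let encontrou_out := if item == "OUT" then true else encontrou_out
    if item == "IN" && encontrou_out then true else filtroLoopA rest encontrou_out

def filtro_tipo_servico (lista : List String) : Bool := filtroLoopA lista false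

-- ===== PORT B =====
def filtro_tipo_servico_alt (lista : List String) : Bool :=
  if ¬ lista.contains "OUT" then false
  else
    match PySem.List.index? lista "OUT" with
    | none => false
    | some i => (PySem.List.slice lista (some ((i + 1 : Nat) : Int)) none).contains "IN"

-- ===== PRECONDITION & SPEC =====
def Spec_filtro_tipo_servico (lista : List String) (out : Bool) : Prop := out = filtro_tipo_servico_alt lista
instance (lista : List String) (out : Bool) : Decidable (Spec_filtro_tipo_servico lista out) := by unfold Spec_filtro_tipo_servico; infer_instance

-- ===== CLAIM (what is proved, stated in full; the proofs are below) =====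
def Claim_equal_filtro_tipo_servico : Prop := ∀ (lista : List String), Dom_filtro_tipo_servico lista → Spec_filtro_tipo_servico lista (filtro_tipo_servico lista)

-- ===== LEMMAS AND PROOFS =====

-- once the flag is set, A's loop just searches for "IN"
theorem filtroLoopA_true (lista : List String) : filtroLoopA lista true = lista.contains "IN" := by
  induction lista with
  | nil => rfl
  | cons x xs ih =>
    by_cases hx : x = "IN"
    · simp [filtroLoopA, hx]
    · have hx' : "IN" ≠ x := fun h => hx h.symm
      simp [filtroLoopA, hx, hx', ih]

theorem filtroLoopA_false_eq_alt (lista : List String) :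
    filtroLoopA lista false = filtro_tipo_servico_alt lista := by
  induction lista with
  | nil => rfl
  | cons x xs ih =>
    by_cases hx : x = "OUT"
    · subst hx
      rw [filtro_tipo_servico_alt, PySem.List.index?_cons_self]
      simp only [PySem.List.slice_from_natCast]
      simp [filtroLoopA, filtroLoopA_true]
    · have hx' : "OUT" ≠ x := fun h => hx h.symm
      have hidx := PySem.List.index?_cons_of_ne (x := x) (v := "OUT") xs hx
      rw [filtro_tipo_servico_alt] at ih ⊢
      rw [hidx]
      by_cases hm : "OUT" ∈ xs
      · obtain ⟨i, hi⟩ := Option.isSome_iff_exists.mp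
          ((PySem.List.index?_isSome_iff xs "OUT").mpr hm)
        rw [hi] at ih ⊢
        simp only [PySem.List.slice_from_natCast] at ih ⊢
        simp [filtroLoopA, hx, hx', hm] at ih ⊢
        exact ih
      · have hnone := (PySem.List.index?_eq_none_iff xs "OUT").mpr hm
        rw [hnone] at ih ⊢
        simp [filtroLoopA, hx, hx', hm] at ih ⊢
        exact ih

-- ===== VERDICT (by name: the statement is the Claim_ definition above) =====
theorem filtro_tipo_servico_spec : Claim_equal_filtro_tipo_servico := by
  intro lista _
  unfold Spec_filtro_tipo_servico filtro_tipo_servico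
  exact filtroLoopA_false_eq_alt lista
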